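-- pv_equiv track=rewrite | github.com/grimmsgadgets-cmyk/actortracker | app.py | _priority_know_focus
-- ===== SOURCE A (Python) =====
-- def _priority_know_focus(question_text: str) -> str:
--     lowered = question_text.lower()
--     if any(token in lowered for token in ('phish', 'email')):
--         return 'This actor may be using phishing/email delivery right now.'
--     if any(token in lowered for token in ('cve', 'vpn', 'edge', 'exploit')):
--         return 'This actor may be exploiting internet-facing systems for entry.'
--     if any(token in lowered for token in ('powershell', 'wmi', 'scheduled task', 'execution')):
--         return 'This actor may be executing payloads on endpoints.'
--     if any(token in lowered for token in ('dns', 'domain', 'c2', 'beacon')):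
--         return 'This actor may be using C2/beacon traffic for control.'
--     if any(token in lowered for token in ('hash', 'file', 'process', 'command line')):
--         return 'This actor may leave endpoint file/process artifacts.'
--     return 'Recent reporting suggests potentially active actor behavior.'
-- ===== SOURCE B (Python) =====
-- _TOKEN_PRIORITY = {
--     'phish': 0, 'email': 0,
--     'cve': 1, 'vpn': 1, 'edge': 1, 'exploit': 1,
--     'powershell': 2, 'wmi': 2, 'scheduled task': 2, 'execution': 2,
--     'dns': 3, 'domain': 3, 'c2': 3, 'beacon': 3,
--     'hash': 4, 'file': 4, 'process': 4, 'command line': 4,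
-- }
--
-- _MESSAGES = [
--     'This actor may be using phishing/email delivery right now.',
--     'This actor may be exploiting internet-facing systems for entry.',
--     'This actor may be executing payloads on endpoints.',
--     'This actor may be using C2/beacon traffic for control.',
--     'This actor may leave endpoint file/process artifacts.',
--     'Recent reporting suggests potentially active actor behavior.',
-- ]
--
-- def _priority_know_focus(question_text: str) -> str:
--     lowered = question_text.lower()
--     best = len(_MESSAGES) - 1
--     for token, priority in _TOKEN_PRIORITY.items():
--         if priority < best and token in lowered:
--             best = priority
--     return _MESSAGES[best]
-- ===== Notes on version B (the rewrite author's own statement) =====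
-- stated objective: alternative
-- what changed: Replaces A's ordered first-match cascade of five if/any branches with a flat token-to-priority dict scanned in full to compute the minimum matching priority, followed by a message-table lookup.
import Mathlib
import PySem

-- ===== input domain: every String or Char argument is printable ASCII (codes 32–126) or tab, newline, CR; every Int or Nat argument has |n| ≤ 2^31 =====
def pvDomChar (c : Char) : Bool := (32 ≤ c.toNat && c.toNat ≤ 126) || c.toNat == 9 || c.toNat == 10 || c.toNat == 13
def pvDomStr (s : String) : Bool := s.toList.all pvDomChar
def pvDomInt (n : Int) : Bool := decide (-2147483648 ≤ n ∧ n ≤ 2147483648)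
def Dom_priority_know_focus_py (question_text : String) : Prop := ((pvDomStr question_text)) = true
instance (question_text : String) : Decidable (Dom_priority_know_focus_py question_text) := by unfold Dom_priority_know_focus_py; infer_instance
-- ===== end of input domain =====

-- B replaces A's ordered first-match branch cascade by a flat token→priority map scanned in
-- full for the minimum matching priority, then a message-table lookup (objective: alternative).

-- ===== PORT A =====
def priority_know_focus_py (question_text : String) : String :=
  let lowered := PySem.Str.lower question_text
  if ["phish", "email"].any (fun token => PySem.Str.isIn token lowered) then
    "This actor may be using phishing/email delivery right now."
  else if ["cve", "vpn", "edge", "exploit"].any (fun token => PySem.Str.isIn token lowered) then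
    "This actor may be exploiting internet-facing systems for entry."
  else if ["powershell", "wmi", "scheduled task", "execution"].any (fun token => PySem.Str.isIn token lowered) then
    "This actor may be executing payloads on endpoints."
  else if ["dns", "domain", "c2", "beacon"].any (fun token => PySem.Str.isIn token lowered) then
    "This actor may be using C2/beacon traffic for control."
  else if ["hash", "file", "process", "command line"].any (fun token => PySem.Str.isIn token lowered) then
    "This actor may leave endpoint file/process artifacts."
  else
    "Recent reporting suggests potentially active actor behavior."

-- ===== PORT B =====
-- Python dict _TOKEN_PRIORITY as an association list in insertion order.
def pvTokenPriority : List (String × Nat) :=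
  [ ("phish", 0), ("email", 0),
    ("cve", 1), ("vpn", 1), ("edge", 1), ("exploit", 1),
    ("powershell", 2), ("wmi", 2), ("scheduled task", 2), ("execution", 2),
    ("dns", 3), ("domain", 3), ("c2", 3), ("beacon", 3),
    ("hash", 4), ("file", 4), ("process", 4), ("command line", 4) ]

def pvMessages : List String :=
  [ "This actor may be using phishing/email delivery right now.",
    "This actor may be exploiting internet-facing systems for entry.",
    "This actor may be executing payloads on endpoints.",
    "This actor may be using C2/beacon traffic for control.",
    "This actor may leave endpoint file/process artifacts.",
    "Recent reporting suggests potentially active actor behavior." ]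

def priority_know_focus_py_alt (question_text : String) : String :=
  let lowered := PySem.Str.lower question_text
  let best := pvTokenPriority.foldl
    (fun best p => if p.2 < best && PySem.Str.isIn p.1 lowered then p.2 else best)
    (pvMessages.length - 1)
  -- _MESSAGES[best]: best ∈ 0..5 is always in range, so the getD default is never used
  pvMessages.getD best "Recent reporting suggests potentially active actor behavior."

-- ===== PRECONDITION & SPEC =====
def Spec_priority_know_focus_py (question_text : String) (out : String) : Prop := out = priority_know_focus_py_alt question_text
instance (question_text : String) (out : String) : Decidable (Spec_priority_know_focus_py question_text out) := by unfold Spec_priority_know_focus_py; infer_instance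

-- ===== CLAIM (what is proved, stated in full; the proofs are below) =====
def Claim_equal_priority_know_focus_py : Prop := ∀ (question_text : String), Dom_priority_know_focus_py question_text → Spec_priority_know_focus_py question_text (priority_know_focus_py question_text)

-- ===== LEMMAS AND PROOFS =====

-- Folding one constant-priority segment of the token map computes:
-- the segment's priority if it beats the accumulator and any of its tokens matches, else the accumulator.
lemma pvSeg (m : String → Bool) (i : Nat) (ts : List String) (acc : Nat) :
    List.foldl (fun best p => if p.2 < best && m p.1 then p.2 else best) acc
        (ts.map (fun t => (t, i)))
      = if i < acc && ts.any m then i else acc := by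
  induction ts generalizing acc with
  | nil => simp
  | cons t rest ih =>
    rw [List.map_cons, List.foldl_cons, List.any_cons, ih]
    by_cases hm : m t = true <;> by_cases hlt : i < acc <;> by_cases hb : rest.any m = true <;>
      simp [hm, hlt, hb]

-- The token map is the concatenation of its five constant-priority segments.
lemma pvRules_eq : pvTokenPriority =
    (["phish", "email"].map (fun t => (t, 0)))
    ++ (["cve", "vpn", "edge", "exploit"].map (fun t => (t, 1)))
    ++ (["powershell", "wmi", "scheduled task", "execution"].map (fun t => (t, 2)))
    ++ (["dns", "domain", "c2", "beacon"].map (fun t => (t, 3)))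
    ++ (["hash", "file", "process", "command line"].map (fun t => (t, 4))) := rfl

-- ===== VERDICT (by name: the statement is the Claim_ definition above) =====
theorem priority_know_focus_py_spec : Claim_equal_priority_know_focus_py := by
  intro q _
  unfold Spec_priority_know_focus_py priority_know_focus_py priority_know_focus_py_alt
  rw [pvRules_eq]
  simp only [List.foldl_append]
  rw [pvSeg (fun t => PySem.Str.isIn t (PySem.Str.lower q)),
      pvSeg (fun t => PySem.Str.isIn t (PySem.Str.lower q)),
      pvSeg (fun t => PySem.Str.isIn t (PySem.Str.lower q)),
      pvSeg (fun t => PySem.Str.isIn t (PySem.Str.lower q)),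
      pvSeg (fun t => PySem.Str.isIn t (PySem.Str.lower q))]
  generalize ["phish", "email"].any (fun t => PySem.Str.isIn t (PySem.Str.lower q)) = g0
  generalize ["cve", "vpn", "edge", "exploit"].any (fun t => PySem.Str.isIn t (PySem.Str.lower q)) = g1
  generalize ["powershell", "wmi", "scheduled task", "execution"].any (fun t => PySem.Str.isIn t (PySem.Str.lower q)) = g2
  generalize ["dns", "domain", "c2", "beacon"].any (fun t => PySem.Str.isIn t (PySem.Str.lower q)) = g3
  generalize ["hash", "file", "process", "command line"].any (fun t => PySem.Str.isIn t (PySem.Str.lower q)) = g4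
  revert g0 g1 g2 g3 g4
  decide
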